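-- pv_equiv track=rewrite | github.com/DaveRoox/AdventOfCode | 2021/day19.py | rows_match
-- ===== SOURCE A (Python) =====
-- def rows_match(r1, r2, vx, vy, vz, sign_x, sign_y, sign_z):
--     sr2, count = {}, 0
--     for p in r1:
--         sr2[p] = 1 + sr2.get(p, 0)
--     for p in r2:
--         p = (sign_x * p[vx], sign_y * p[vy], sign_z * p[vz])
--         if sr2.get(p, 0) > 0:
--             count += 1
--             if count >= min(12, len(r1)):
--                 return True
--             sr2[p] -= 1
--     return False
-- ===== SOURCE B (Python) =====
-- def rows_match(r1, r2, vx, vy, vz, sign_x, sign_y, sign_z):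
--     t2 = [(sign_x * p[vx], sign_y * p[vy], sign_z * p[vz]) for p in r2]
--     c1 = {}
--     for p in r1:
--         c1[p] = c1.get(p, 0) + 1
--     c2 = {}
--     for q in t2:
--         c2[q] = c2.get(q, 0) + 1
--     overlap = sum(min(n, c2.get(k, 0)) for k, n in c1.items())
--     return overlap >= min(12, len(r1)) and overlap > 0
-- ===== Notes on version B (the rewrite author's own statement) =====
-- stated objective: alternative
-- what changed: Replaces A's stateful greedy scan (mutating a countdown dict with an early return once count reaches the threshold) by a closed-form computation: build both Counters up front and compare the multiset-intersection size sum(min(c1[k], c2[k])) against min(12, len(r1)), with an explicit overlap > 0 guard covering the empty-r1 case.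
import Mathlib
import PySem

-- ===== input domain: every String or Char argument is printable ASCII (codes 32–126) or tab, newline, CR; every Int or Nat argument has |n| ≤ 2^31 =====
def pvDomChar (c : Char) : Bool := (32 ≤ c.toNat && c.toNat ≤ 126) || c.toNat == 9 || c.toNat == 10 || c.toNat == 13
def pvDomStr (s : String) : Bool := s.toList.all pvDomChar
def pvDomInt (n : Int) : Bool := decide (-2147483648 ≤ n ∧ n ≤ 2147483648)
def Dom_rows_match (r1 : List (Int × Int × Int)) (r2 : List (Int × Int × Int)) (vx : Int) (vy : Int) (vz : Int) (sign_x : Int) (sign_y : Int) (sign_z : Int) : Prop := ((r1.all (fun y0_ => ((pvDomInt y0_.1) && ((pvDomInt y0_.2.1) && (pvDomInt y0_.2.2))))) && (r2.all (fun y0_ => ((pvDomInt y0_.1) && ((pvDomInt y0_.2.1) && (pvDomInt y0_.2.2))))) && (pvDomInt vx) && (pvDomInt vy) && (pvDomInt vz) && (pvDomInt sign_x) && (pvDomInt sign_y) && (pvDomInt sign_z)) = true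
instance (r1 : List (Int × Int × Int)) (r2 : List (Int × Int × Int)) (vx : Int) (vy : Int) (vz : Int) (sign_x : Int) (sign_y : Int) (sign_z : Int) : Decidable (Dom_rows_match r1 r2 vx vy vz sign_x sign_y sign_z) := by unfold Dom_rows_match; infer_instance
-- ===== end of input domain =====

-- B replaces A's stateful greedy scan (countdown dict, early return at the threshold) by a closed
-- form: both counters built up front, multiset-overlap = sum of mins, compared to min(12, len(r1))
-- with an overlap > 0 guard; objective: alternative (same asymptotic cost, different decomposition).

-- shared primitive: Python tuple indexing p[i] on a 3-tuple; for i outside [-3, 2] Python raises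
-- IndexError (excluded by Pre_), the default 0 here is never reached inside Pre_ when r2 ≠ [].
def pvTripGet (p : Int × Int × Int) (i : Int) : Int :=
  if i = 0 ∨ i = -3 then p.1
  else if i = 1 ∨ i = -2 then p.2.1
  else if i = 2 ∨ i = -1 then p.2.2
  else 0

-- ===== PORT A =====
-- A's second loop: early 'return True' becomes structural recursion returning Bool.
def rows_match_loop (vx vy vz sx sy sz thr : Int) :
    List (Int × Int × Int) → PySem.Dict (Int × Int × Int) Int → Int → Bool
  | [], _, _ => false
  | p :: rest, sr2, count =>
    let q := (sx * pvTripGet p vx, sy * pvTripGet p vy, sz * pvTripGet p vz)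
    if sr2.getD q 0 > 0 then
      if count + 1 ≥ thr then true
      else rows_match_loop vx vy vz sx sy sz thr rest (sr2.insert q (sr2.getD q 0 - 1)) (count + 1)
    else rows_match_loop vx vy vz sx sy sz thr rest sr2 count

def rows_match (r1 : List (Int × Int × Int)) (r2 : List (Int × Int × Int)) (vx : Int) (vy : Int) (vz : Int) (sign_x : Int) (sign_y : Int) (sign_z : Int) : Bool :=
  let sr2 := r1.foldl (fun d p => d.insert p (1 + d.getD p 0)) PySem.Dict.empty
  rows_match_loop vx vy vz sign_x sign_y sign_z (min 12 (r1.length : Int)) r2 sr2 0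

-- ===== PORT B =====
def pvTransform (vx vy vz sx sy sz : Int) (p : Int × Int × Int) : Int × Int × Int :=
  (sx * pvTripGet p vx, sy * pvTripGet p vy, sz * pvTripGet p vz)

def rows_match_alt (r1 : List (Int × Int × Int)) (r2 : List (Int × Int × Int)) (vx : Int) (vy : Int) (vz : Int) (sign_x : Int) (sign_y : Int) (sign_z : Int) : Bool :=
  let t2 := r2.map (pvTransform vx vy vz sign_x sign_y sign_z)
  let c1 := r1.foldl (fun d p => d.insert p (d.getD p 0 + 1)) PySem.Dict.empty
  let c2 := t2.foldl (fun d q => d.insert q (d.getD q 0 + 1)) PySem.Dict.empty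
  let overlap := c1.items.foldl (fun acc kn => acc + min kn.2 (c2.getD kn.1 0)) 0
  decide (overlap ≥ min 12 (r1.length : Int) ∧ overlap > 0)

-- ===== PRECONDITION & SPEC =====
-- A (and B) raise IndexError when some point of r2 is indexed with vx/vy/vz outside [-3, 2];
-- Pre_ excludes exactly those inputs (when r2 = [] no indexing happens and A returns).
def Pre_rows_match (r1 : List (Int × Int × Int)) (r2 : List (Int × Int × Int)) (vx : Int) (vy : Int) (vz : Int) (sign_x : Int) (sign_y : Int) (sign_z : Int) : Prop :=
  r2 = [] ∨ ((-3 ≤ vx ∧ vx ≤ 2) ∧ (-3 ≤ vy ∧ vy ≤ 2) ∧ (-3 ≤ vz ∧ vz ≤ 2))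
instance (r1 : List (Int × Int × Int)) (r2 : List (Int × Int × Int)) (vx : Int) (vy : Int) (vz : Int) (sign_x : Int) (sign_y : Int) (sign_z : Int) : Decidable (Pre_rows_match r1 r2 vx vy vz sign_x sign_y sign_z) := by unfold Pre_rows_match; infer_instance

def pvWitness_rows_match : (List (Int × Int × Int)) × (List (Int × Int × Int)) × Int × Int × Int × Int × Int × Int :=
  ([(1, 2, 3)], [(1, 2, 3)], 0, 1, 2, 1, 1, 1)

def Spec_rows_match (r1 : List (Int × Int × Int)) (r2 : List (Int × Int × Int)) (vx : Int) (vy : Int) (vz : Int) (sign_x : Int) (sign_y : Int) (sign_z : Int) (out : Bool) : Prop := out = rows_match_alt r1 r2 vx vy vz sign_x sign_y sign_z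
instance (r1 : List (Int × Int × Int)) (r2 : List (Int × Int × Int)) (vx : Int) (vy : Int) (vz : Int) (sign_x : Int) (sign_y : Int) (sign_z : Int) (out : Bool) : Decidable (Spec_rows_match r1 r2 vx vy vz sign_x sign_y sign_z out) := by unfold Spec_rows_match; infer_instance

-- ===== CLAIM (what is proved, stated in full; the proofs are below) =====
def Claim_equal_rows_match : Prop := ∀ (r1 : List (Int × Int × Int)) (r2 : List (Int × Int × Int)) (vx : Int) (vy : Int) (vz : Int) (sign_x : Int) (sign_y : Int) (sign_z : Int), Dom_rows_match r1 r2 vx vy vz sign_x sign_y sign_z → Pre_rows_match r1 r2 vx vy vz sign_x sign_y sign_z → Spec_rows_match r1 r2 vx vy vz sign_x sign_y sign_z (rows_match r1 r2 vx vy vz sign_x sign_y sign_z)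

-- ===== LEMMAS AND PROOFS =====

-- A's greedy matched count, abstracted from the early return: number of points of l matched
-- (with multiplicity) against the countdown dict d.
def pvMatchCount (d : PySem.Dict (Int × Int × Int) Int) : List (Int × Int × Int) → Nat
  | [] => 0
  | q :: rest =>
    if d.getD q 0 > 0 then 1 + pvMatchCount (d.insert q (d.getD q 0 - 1)) rest
    else pvMatchCount d rest

-- A's loop is the threshold test on the total matched count.
lemma rows_match_loop_eq (vx vy vz sx sy sz thr : Int) :
    ∀ (l : List (Int × Int × Int)) (d : PySem.Dict (Int × Int × Int) Int) (c : Int),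
      rows_match_loop vx vy vz sx sy sz thr l d c
        = decide (thr ≤ c + (pvMatchCount d (l.map (pvTransform vx vy vz sx sy sz)) : Int)
                  ∧ 0 < pvMatchCount d (l.map (pvTransform vx vy vz sx sy sz))) := by
  intro l
  induction l with
  | nil => intro d c; simp [rows_match_loop, pvMatchCount]
  | cons p rest ih =>
    intro d c
    simp only [rows_match_loop, List.map_cons, pvMatchCount, pvTransform]
    by_cases h : d.getD (sx * pvTripGet p vx, sy * pvTripGet p vy, sz * pvTripGet p vz) 0 > 0
    · simp only [h, if_pos]
      by_cases hc : c + 1 ≥ thr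
      · simp only [if_pos hc]
        rw [eq_comm, decide_eq_true_iff]
        refine ⟨?_, by omega⟩
        push_cast
        omega
      · simp only [if_neg hc, ih]
        rw [decide_eq_decide]
        push_cast
        constructor <;> (intro ⟨h1, h2⟩; constructor <;> omega)
    · simp only [h, if_false, ih]

-- sums over a Nodup list that differ at exactly one element
lemma sum_map_update_one {α : Type} [DecidableEq α] (f g : α → Int) (c : Int) :
    ∀ (K : List α), K.Nodup → ∀ q ∈ K, f q = c + g q → (∀ k ∈ K, k ≠ q → f k = g k) →
      (K.map f).sum = c + (K.map g).sum := by
  intro K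
  induction K with
  | nil => intro _ q hq; simp at hq
  | cons a t ih =>
    intro hnd q hq hfq hrest
    rcases List.mem_cons.mp hq with rfl | hqt
    · have : ∀ k ∈ t, f k = g k := by
        intro k hk
        exact hrest k (List.mem_cons_of_mem _ hk) (fun hkq => (List.nodup_cons.mp hnd).1 (hkq ▸ hk))
      simp only [List.map_cons, List.sum_cons, hfq, List.map_congr_left this]
      ring
    · have ha : f a = g a := hrest a List.mem_cons_self (fun haq => (List.nodup_cons.mp hnd).1 (haq ▸ hqt))
      have := ih (List.nodup_cons.mp hnd).2 q hqt hfq (fun k hk => hrest k (List.mem_cons_of_mem _ hk))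
      simp only [List.map_cons, List.sum_cons, ha, this]
      ring

-- the matched count is the multiset overlap, summed over any Nodup list K covering the
-- positive entries of d
lemma pvMatchCount_eq_sum (K : List (Int × Int × Int)) (hK : K.Nodup) :
    ∀ (l : List (Int × Int × Int)) (d : PySem.Dict (Int × Int × Int) Int),
      (∀ k, 0 ≤ d.getD k 0) → (∀ k, 0 < d.getD k 0 → k ∈ K) →
      (pvMatchCount d l : Int) = (K.map (fun k => min (d.getD k 0) (l.count k : Int))).sum := by
  intro l
  induction l with
  | nil =>
    intro d hnn _
    have : ∀ k ∈ K, min (d.getD k 0) (([] : List (Int × Int × Int)).count k : Int) = 0 := by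
      intro k _
      have := hnn k
      simp only [List.count_nil, Nat.cast_zero]
      omega
    rw [List.map_congr_left this]
    simp [pvMatchCount]
  | cons q rest ih =>
    intro d hnn hpos
    by_cases h : d.getD q 0 > 0
    · have hqK : q ∈ K := hpos q h
      have hnn' : ∀ k, 0 ≤ (d.insert q (d.getD q 0 - 1)).getD k 0 := by
        intro k
        rw [PySem.Dict.getD_insert]
        split_ifs with hk
        · subst hk; omega
        · exact hnn k
      have hpos' : ∀ k, 0 < (d.insert q (d.getD q 0 - 1)).getD k 0 → k ∈ K := by
        intro k hk
        rw [PySem.Dict.getD_insert] at hk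
        split_ifs at hk with hkq
        · exact hkq ▸ hqK
        · exact hpos k hk
      have hrec := ih (d.insert q (d.getD q 0 - 1)) hnn' hpos'
      simp only [pvMatchCount, if_pos h]
      push_cast
      rw [hrec, eq_comm]
      apply sum_map_update_one _ _ 1 K hK q hqK
      · rw [PySem.Dict.getD_insert, if_pos rfl]
        simp only [List.count_cons_self]
        push_cast
        have : (0:Int) ≤ (rest.count q : Int) := by positivity
        omega
      · intro k _ hkq
        rw [PySem.Dict.getD_insert, if_neg hkq]
        simp [Ne.symm hkq]
    · simp only [pvMatchCount, if_neg h]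
      rw [ih d hnn hpos]
      apply congrArg
      apply List.map_congr_left
      intro k _
      by_cases hkq : k = q
      · subst hkq
        have := hnn k
        have h0 : d.getD k 0 = 0 := by omega
        simp only [h0, List.count_cons_self]
        have : (0:Int) ≤ (rest.count k : Int) := by positivity
        push_cast
        omega
      · simp [Ne.symm hkq]

-- A's first loop ('sr2[p] = 1 + sr2.get(p, 0)') builds the same counter as B's
lemma counterA_eq (r1 : List (Int × Int × Int)) :
    r1.foldl (fun d p => d.insert p (1 + d.getD p 0)) PySem.Dict.empty
      = PySem.Dict.counter r1 := by
  have : (fun (d : PySem.Dict (Int × Int × Int) Int) p => d.insert p (1 + d.getD p 0))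
       = (fun d p => d.insert p (d.getD p 0 + 1)) := by
    funext d p; rw [Int.add_comm]
  rw [this, PySem.Dict.foldl_insert_getD_add_one_eq_counter]

-- ===== VERDICT (by name: the statement is the Claim_ definition above) =====
theorem rows_match_spec : Claim_equal_rows_match := by
  intro r1 r2 vx vy vz sx sy sz _ _
  unfold Spec_rows_match rows_match rows_match_alt
  simp only [counterA_eq, PySem.Dict.foldl_insert_getD_add_one_eq_counter]
  set t2 := r2.map (pvTransform vx vy vz sx sy sz) with ht2
  rw [rows_match_loop_eq]
  have hsum := pvMatchCount_eq_sum (PySem.Dict.counter r1).keys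
    (PySem.Dict.nodup_keys_counter r1) t2 (PySem.Dict.counter r1)
    (fun k => by rw [PySem.Dict.getD_counter]; positivity)
    (fun k hk => by
      rw [PySem.Dict.getD_counter] at hk
      rw [PySem.Dict.keys_counter, PySem.Set.mem_ofList]
      exact List.count_pos_iff.mp (by exact_mod_cast hk))
  have hitems : (PySem.Dict.counter r1).items.foldl
      (fun acc kn => acc + min kn.2 ((PySem.Dict.counter t2).getD kn.1 0)) 0
      = (pvMatchCount (PySem.Dict.counter r1) t2 : Int) := by
    rw [hsum]
    rw [PySem.List.foldl_add]
    have hkeys : (PySem.Dict.counter r1).items.map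
        (fun kn => min kn.2 ((PySem.Dict.counter t2).getD kn.1 0))
        = (PySem.Dict.counter r1).keys.map
            (fun k => min ((PySem.Dict.counter r1).getD k 0) (t2.count k : Int)) := by
      rw [PySem.Dict.items_counter, PySem.Dict.keys_counter, List.map_map]
      apply List.map_congr_left
      intro k _
      simp only [Function.comp_apply, PySem.Dict.getD_counter]
    rw [hkeys]
    simp only [PySem.Dict.getD_counter]
    ring
  rw [decide_eq_decide, ← ht2, hitems]
  omega
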